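-- pv_equiv track=rewrite | github.com/timhaarhuis/BME | main.py | outlier_rejection_filter
-- ===== SOURCE A (Python) =====
-- def outlier_rejection_filter(data, threshold):
--     filtered_data = [data[0]]
--     for i in range(1, len(data)):
--         if abs(data[i] - data[i-1]) > threshold:
--             filtered_data.append(filtered_data[-1])
--         else:
--             filtered_data.append(data[i])
--     return filtered_data
-- ===== SOURCE B (Python) =====
-- def outlier_rejection_filter(data, threshold):
--     n = len(data)
--     # detection: indices whose sample is kept (non-outlier); index 0 is always kept
--     kept = [0] + [i for i in range(1, n) if abs(data[i] - data[i - 1]) <= threshold]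
--     # emission: each kept index's value covers the run up to the next kept index
--     out = []
--     for k, nxt in zip(kept, kept[1:] + [n]):
--         out += [data[k]] * (nxt - k)
--     return out
-- ===== Notes on version B (the rewrite author's own statement) =====
-- stated objective: alternative
-- what changed: B is a segment/run-length algorithm: it first computes the list of kept indices (0 plus every non-outlier index), then emits the output as blocks, replicating each kept value until the next kept index; A fills element by element, re-reading filtered_data[-1] in a branch per element.
import Mathlib
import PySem

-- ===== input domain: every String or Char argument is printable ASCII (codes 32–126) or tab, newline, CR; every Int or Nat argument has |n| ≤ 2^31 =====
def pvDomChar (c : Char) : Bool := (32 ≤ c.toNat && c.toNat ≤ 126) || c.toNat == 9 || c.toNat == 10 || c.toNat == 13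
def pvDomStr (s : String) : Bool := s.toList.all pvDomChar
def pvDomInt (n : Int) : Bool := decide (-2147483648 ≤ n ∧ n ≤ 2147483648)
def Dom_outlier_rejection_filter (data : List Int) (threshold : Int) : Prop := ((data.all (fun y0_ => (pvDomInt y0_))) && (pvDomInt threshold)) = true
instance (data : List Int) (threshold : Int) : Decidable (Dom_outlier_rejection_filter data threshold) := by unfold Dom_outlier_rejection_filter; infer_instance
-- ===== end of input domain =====

-- B is a segment/run-length algorithm (kept-index list, then block emission); objective: alternative decomposition, same O(n) cost.


-- ===== PORT A =====
-- for i in range(1, len(data)): append filtered_data[-1] or data[i]; [] case is outside Pre_ (IndexError)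
def outlier_rejection_filter (data : List Int) (threshold : Int) : List Int :=
  match data with
  | [] => []
  | d0 :: _ =>
    (PySem.List.pyRange 1 data.length 1).foldl
      (fun acc i =>
        if |PySem.List.pyGetD data i 0 - PySem.List.pyGetD data (i - 1) 0| > threshold then
          acc ++ [PySem.List.pyGetD acc (-1) 0]
        else
          acc ++ [PySem.List.pyGetD data i 0])
      [d0]

-- ===== PORT B =====
-- kept = [0] + [i in 1..n-1 with |data[i]-data[i-1]| <= t]; emit data[k] replicated until the next
-- kept index (terminal bound n). Indices are Nat: every index B touches is in [0, n), where List.getD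
-- is exact for Python's data[i].
def outlier_rejection_filter_alt (data : List Int) (threshold : Int) : List Int :=
  let n := data.length
  let kept := 0 :: (List.range' 1 (n - 1)).filter
      (fun i => decide (|data.getD i 0 - data.getD (i - 1) 0| ≤ threshold))
  (kept.zip (kept.drop 1 ++ [n])).foldl
    (fun out kn => out ++ List.replicate (kn.2 - kn.1) (data.getD kn.1 0)) []

-- ===== PRECONDITION & SPEC =====
-- Python A raises IndexError (data[0]) on the empty list; B raises there too ([data[0]] * 0 still evaluates data[0]).
def Pre_outlier_rejection_filter (data : List Int) (threshold : Int) : Prop := data ≠ []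
instance (data : List Int) (threshold : Int) : Decidable (Pre_outlier_rejection_filter data threshold) := by unfold Pre_outlier_rejection_filter; infer_instance
def pvWitness_outlier_rejection_filter : List Int × Int := ([1, 5, 2], 2)

def Spec_outlier_rejection_filter (data : List Int) (threshold : Int) (out : List Int) : Prop := out = outlier_rejection_filter_alt data threshold
instance (data : List Int) (threshold : Int) (out : List Int) : Decidable (Spec_outlier_rejection_filter data threshold out) := by unfold Spec_outlier_rejection_filter; infer_instance

-- ===== CLAIM (what is proved, stated in full; the proofs are below) =====
def Claim_equal_outlier_rejection_filter : Prop := ∀ (data : List Int) (threshold : Int), Dom_outlier_rejection_filter data threshold → Pre_outlier_rejection_filter data threshold → Spec_outlier_rejection_filter data threshold (outlier_rejection_filter data threshold)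

-- ===== LEMMAS AND PROOFS =====

-- reference recursion for A's loop: prev = previous ORIGINAL value, last = last kept value
def pvGo (t : Int) : Int → Int → List Int → List Int
  | _, _, [] => []
  | prev, last, x :: xs => if |x - prev| > t then last :: pvGo t x last xs else x :: pvGo t x x xs

-- index of the last kept sample at or before i
def pvSrc (data : List Int) (t : Int) : Nat → Nat
  | 0 => 0
  | j + 1 => if |data.getD (j + 1) 0 - data.getD j 0| > t then pvSrc data t j else j + 1

theorem pvA_fold (t : Int) (xs : List Int) : ∀ (pre acc : List Int) (prev last : Int),
    pre.getLast? = some prev → acc.getLast? = some last →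
    ((PySem.List.pyRange pre.length (pre ++ xs).length 1).foldl
      (fun acc i =>
        if |PySem.List.pyGetD (pre ++ xs) i 0 - PySem.List.pyGetD (pre ++ xs) (i - 1) 0| > t then
          acc ++ [PySem.List.pyGetD acc (-1) 0]
        else
          acc ++ [PySem.List.pyGetD (pre ++ xs) i 0]) acc) = acc ++ pvGo t prev last xs := by
  induction xs with
  | nil =>
    intro pre acc prev last _ _
    rw [PySem.List.pyRange_one_eq_nil (by simp)]
    simp [pvGo]
  | cons x xs ih =>
    intro pre acc prev last hpre hacc
    have hpre' : pre ≠ [] := by rintro rfl; simp at hpre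
    rw [PySem.List.pyRange_one_cons (by simp)]
    simp only [List.foldl_cons]
    have hx : PySem.List.pyGetD (pre ++ x :: xs) (pre.length : Int) 0 = x := by
      simp [PySem.List.pyGetD]
    have hprev : PySem.List.pyGetD (pre ++ x :: xs) ((pre.length : Int) - 1) 0 = prev := by
      obtain ⟨pre', p, rfl⟩ := pre.eq_nil_or_concat.resolve_left hpre'
      simp only [List.concat_eq_append] at hpre ⊢
      have hp : p = prev := by simpa using hpre
      rw [← hp]
      have h1 : ((pre' ++ [p]).length : Int) - 1 = (pre'.length : Int) := by simp
      rw [h1]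
      have := PySem.List.pyGet?_append_length (pre := pre') (y := p) (ys := [] ++ x :: xs)
      simp only [List.append_assoc, List.cons_append, List.nil_append] at this ⊢
      simp [PySem.List.pyGetD, this]
    have hlast : PySem.List.pyGetD acc (-1) 0 = last := by
      have hacc' : acc ≠ [] := by rintro rfl; simp at hacc
      rw [PySem.List.pyGetD_neg_one (h := hacc')]
      rw [List.getLast?_eq_some_getLast (h := hacc')] at hacc
      exact (Option.some.injEq _ _).mp hacc
    rw [hx, hprev, hlast]
    have hsplit : pre ++ x :: xs = (pre ++ [x]) ++ xs := by simp
    have hlen : (pre.length : Int) + 1 = ((pre ++ [x]).length : Int) := by simp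
    by_cases h : |x - prev| > t
    · rw [if_pos h]
      have := ih (pre ++ [x]) (acc ++ [last]) x last (by simp) (by simp)
      rw [hsplit, hlen, this]
      simp [pvGo, h]
    · rw [if_neg h]
      have := ih (pre ++ [x]) (acc ++ [x]) x x (by simp) (by simp)
      rw [hsplit, hlen, this]
      simp [pvGo, h]

-- A's loop computes data[pvSrc i] at every position
theorem pvGo_eq (data : List Int) (t : Int) : ∀ (n i : Nat), i + 1 + n = data.length →
    pvGo t (data.getD i 0) (data.getD (pvSrc data t i) 0) (data.drop (i + 1))
      = (List.range' (i + 1) n).map (fun j => data.getD (pvSrc data t j) 0) := by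
  intro n
  induction n with
  | zero =>
    intro i h
    rw [List.drop_eq_nil_of_le (by omega)]
    simp [pvGo]
  | succ n ih =>
    intro i h
    have hi : i + 1 < data.length := by omega
    rw [List.drop_eq_getElem_cons hi]
    have hx : data[i + 1]'hi = data.getD (i + 1) 0 := (List.getD_eq_getElem data 0 hi).symm
    rw [List.range'_succ, List.map_cons, hx]
    simp only [pvGo]
    have ih' := ih (i + 1) (by omega)
    by_cases hc : |data.getD (i + 1) 0 - data.getD i 0| > t
    · rw [if_pos hc]
      have hs : pvSrc data t (i + 1) = pvSrc data t i := by rw [pvSrc, if_pos hc]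
      rw [hs] at ih'
      rw [ih', hs]
    · rw [if_neg hc]
      have hs : pvSrc data t (i + 1) = i + 1 := by rw [pvSrc, if_neg hc]
      rw [hs] at ih'
      rw [ih', hs]

-- src is constant across a stretch of outliers
theorem pvSrc_stretch (data : List Int) (t : Int) (k0 : Nat) (h0 : pvSrc data t k0 = k0) :
    ∀ m, (∀ j, k0 < j → j ≤ k0 + m → |data.getD j 0 - data.getD (j - 1) 0| > t) →
      pvSrc data t (k0 + m) = k0 := by
  intro m
  induction m with
  | zero => intro _; simpa using h0
  | succ m ih =>
    intro h
    have hout := h (k0 + m + 1) (by omega) (by omega)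
    have : k0 + (m + 1) = (k0 + m) + 1 := by omega
    rw [this, pvSrc]
    simp only [Nat.add_sub_cancel] at hout
    rw [if_pos hout]
    exact ih (fun j hj1 hj2 => h j hj1 (by omega))

theorem pvFilter_range'_cons (p : Nat → Bool) :
    ∀ (m a k : Nat) (ks : List Nat), (List.range' a m).filter p = k :: ks →
      a ≤ k ∧ k < a + m ∧ p k = true ∧ (∀ j, a ≤ j → j < k → p j = false) ∧
        ks = (List.range' (k + 1) (a + m - (k + 1))).filter p := by
  intro m
  induction m with
  | zero => intro a k ks h; simp at h
  | succ m ih =>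
    intro a k ks h
    rw [List.range'_succ, List.filter_cons] at h
    by_cases hp : p a
    · rw [if_pos hp] at h
      obtain ⟨rfl, rfl⟩ : a = k ∧ (List.range' (a + 1) m).filter p = ks := by
        exact ⟨(List.cons.injEq _ _ _ _).mp h |>.1, (List.cons.injEq _ _ _ _).mp h |>.2⟩
      refine ⟨le_refl _, by omega, hp, fun j h1 h2 => absurd (lt_of_le_of_lt h1 h2) (lt_irrefl _), ?_⟩
      have he : a + (m + 1) - (a + 1) = m := by omega
      rw [he]
    · rw [if_neg hp] at h
      obtain ⟨h1, h2, h3, h4, h5⟩ := ih (a + 1) k ks h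
      have he : a + 1 + m - (k + 1) = a + (m + 1) - (k + 1) := by omega
      refine ⟨by omega, by omega, h3, fun j hj1 hj2 => ?_, by rw [h5, he]⟩
      rcases Nat.eq_or_lt_of_le hj1 with rfl | hlt
      · exact eq_false_of_ne_true hp
      · exact h4 j hlt hj2

-- a constant-src span maps to a replicate block
theorem pvMap_rep (data : List Int) (t : Int) (k0 m : Nat)
    (h : ∀ j, k0 ≤ j → j < k0 + m → pvSrc data t j = k0) :
    (List.range' k0 m).map (fun j => data.getD (pvSrc data t j) 0)
      = List.replicate m (data.getD k0 0) := by
  have hc : (List.range' k0 m).map (fun j => data.getD (pvSrc data t j) 0)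
      = (List.range' k0 m).map (fun _ => data.getD k0 0) := by
    apply List.map_congr_left
    intro a ha
    rw [List.mem_range'_1] at ha
    rw [h a ha.1 ha.2]
  rw [hc, List.map_const', List.length_range']

-- B's block emission computes the same map
theorem pvB_blocks (data : List Int) (t : Int) (n : Nat) (hn : n = data.length) :
    ∀ (ks : List Nat) (k0 : Nat) (acc : List Int), k0 < n → pvSrc data t k0 = k0 →
      ks = (List.range' (k0 + 1) (n - (k0 + 1))).filter
        (fun i => decide (|data.getD i 0 - data.getD (i - 1) 0| ≤ t)) →
      (((k0 :: ks).zip (ks ++ [n])).foldl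
        (fun out kn => out ++ List.replicate (kn.2 - kn.1) (data.getD kn.1 0)) acc)
        = acc ++ (List.range' k0 (n - k0)).map (fun j => data.getD (pvSrc data t j) 0) := by
  intro ks
  induction ks with
  | nil =>
    intro k0 acc hk hsrc hfil
    simp only [List.nil_append, List.zip_cons_cons, List.zip_nil_left, List.foldl_cons,
      List.foldl_nil]
    congr 1
    rw [pvMap_rep data t k0 (n - k0) ?_]
    intro j hj1 hj2
    have hm : j = k0 + (j - k0) := by omega
    rw [hm]
    apply pvSrc_stretch data t k0 hsrc
    intro j' hj'1 hj'2
    have hmem : j' ∈ List.range' (k0 + 1) (n - (k0 + 1)) := by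
      rw [List.mem_range'_1]; omega
    have := (List.filter_eq_nil_iff.mp hfil.symm) j' hmem
    simp only [decide_eq_true_eq] at this
    omega
  | cons k1 ks' ih =>
    intro k0 acc hk hsrc hfil
    obtain ⟨h1, h2, h3, h4, h5⟩ := pvFilter_range'_cons _ _ _ _ _ hfil.symm
    have hk1n : k1 < n := by omega
    have hcnt : k0 + 1 + (n - (k0 + 1)) - (k1 + 1) = n - (k1 + 1) := by omega
    rw [hcnt] at h5
    have hsrc1 : pvSrc data t k1 = k1 := by
      match k1, h1 with
      | m + 1, _ =>
        rw [pvSrc]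
        simp only [Nat.add_sub_cancel, decide_eq_true_eq] at h3
        rw [if_neg (not_lt.mpr h3)]
    have hstretch : ∀ j, k0 ≤ j → j < k1 → pvSrc data t j = k0 := by
      intro j hj1 hj2
      have hm : j = k0 + (j - k0) := by omega
      rw [hm]
      apply pvSrc_stretch data t k0 hsrc
      intro j' hj'1 hj'2
      have := h4 j' (by omega) (by omega)
      simp only [decide_eq_false_iff_not] at this
      omega
    simp only [List.cons_append, List.zip_cons_cons, List.foldl_cons]
    rw [ih k1 (acc ++ List.replicate (k1 - k0) (data.getD k0 0)) hk1n hsrc1 h5]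
    have hsplit : List.range' k0 (n - k0) = List.range' k0 (k1 - k0) ++ List.range' k1 (n - k1) := by
      have := List.range'_append (s := k0) (m := k1 - k0) (n := n - k1) (step := 1)
      rw [show k0 + 1 * (k1 - k0) = k1 by omega, show k1 - k0 + (n - k1) = n - k0 by omega] at this
      exact this.symm
    rw [hsplit, List.map_append,
      pvMap_rep data t k0 (k1 - k0) (fun j hj1 hj2 => hstretch j hj1 (by omega)),
      List.append_assoc]

-- ===== VERDICT (by name: the statement is the Claim_ definition above) =====
theorem outlier_rejection_filter_spec : Claim_equal_outlier_rejection_filter := by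
  intro data threshold _ hpre
  unfold Spec_outlier_rejection_filter
  match data with
  | [] => exact absurd rfl hpre
  | d0 :: tl =>
    unfold outlier_rejection_filter outlier_rejection_filter_alt
    simp only
    have hA := pvA_fold threshold tl [d0] [d0] d0 d0 (by simp) (by simp)
    have hgo := pvGo_eq (d0 :: tl) threshold tl.length 0 (by simp only [List.length_cons]; omega)
    simp only [pvSrc, List.getD_cons_zero, List.drop_succ_cons, List.drop_zero] at hgo
    have hB := pvB_blocks (d0 :: tl) threshold (d0 :: tl).length rfl
      ((List.range' 1 ((d0 :: tl).length - 1)).filter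
        (fun i => decide (|(d0 :: tl).getD i 0 - (d0 :: tl).getD (i - 1) 0| ≤ threshold)))
      0 [] (by simp) rfl rfl
    simp only [Nat.sub_zero, List.length_cons, List.nil_append] at hB
    rw [List.range'_succ] at hB
    simp only [List.map_cons, pvSrc, List.getD_cons_zero] at hB
    simp only [List.length_cons, Nat.add_sub_cancel, List.drop_succ_cons, List.drop_zero] at hB ⊢
    rw [hB]
    simp only [List.singleton_append, List.length_cons, List.length_nil, Nat.zero_add, Nat.cast_one] at hA
    rw [hA, hgo]
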